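/- GENERATED by tools/from_farm_form.py from prooffarm-gif/accepted/run_ctors/Proof.lean (a worked proof of the farm's unit `run_ctors`,
   accepted by the verdict) — do not edit. -/
import Gif.Spec.Units.run_ctors
import Gif.Spec.Proved.run_ctors_Lemmas
import Asan.CheckWalk
/- PORTED (renaming and numbers only) from the heap toy's farm.toyh/worked/run_ctors/{Proof,Lemmas}.lean:
   `.init_array` slot 141000H (the same), constructor 105180H -> 10B300H (only through the label), 1 shadow window -> 8. -/

open X86 X86.User Asan ProgX.Base

set_option maxRecDepth 4000
set_option maxHeartbeats 4000000

/-- `run_ctors` satisfies its contract `runCtorsSpec rt`: `push rbx`, ONE round of the loop over `.init_array` (rbx is a literal,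
so the walker decides both tests of `cmp rbx, __init_array_end` by evaluation: no loop invariant is needed), in it the INDIRECT
call `call [rbx]` whose target is read from image memory (`CtorIn`: `mem64[141000H] = _sub_I_65535_1`), then `pop rbx ; ret`.
The post: the shadow after the constructor is that of `registerMem` of the memory at ITS entry, which differs from ours by two
stack stores only (`rc_eqOn_registerMem`). -/
theorem Gif.Spec.Proved.run_ctors_ok : Gif.Spec.run_ctors.Statement := by
  intro Lay hLay μ hμ u₀ hcode h_ctor u ret he hpre
  v_entry he
  obtain ⟨hctor, hdescs, hok⟩ := hpre
  -- `.init_array`'s one slot, in the form `mov ebx, 0x141000` leaves in rbx: its number (for `u_omega`: the slot is below the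
  -- stack), that it is in the user region, and what it holds (a rewrite rule of the walk: the target of `call [rbx]`)
  have hnum : (Word.ofBV 1314816#32).toNat = 1314816 := by decide
  have hslot : Lay.Has (Word.ofBV 1314816#32) 8 := by
    unfold Layout.Has Layout.lo
    rw [hLay]
    decide
  have hptr : UInt64.ofNat (u.mem.readLE (Word.ofBV 1314816#32) 8) = Gif.L._sub_I_65535_1.entry := by
    have h := hctor.2
    rw [Gif.Spec.run_ctors.rc_initStart, Gif.Spec.run_ctors.rc_ctorEntry] at h
    exact h
  -- 0x100e60 asan_rt.c:191 `push rbx` … 0x100e68 asan_rt.c:194 `(*p)();`: the walk reads the target through the push, finds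
  -- the contract of `_sub_I_65535_1` and applies it
  u_walk hcode [hμ.vendor] span [ProgX.Base.L.textLo, ProgX.Base.L.textHi] side (v_side)
  · -- call_inv: DF and the MXCSR masks at the constructor's entry (`cmp` wrote status flags only)
    show X86.User.abiInv _
    refine ProgX.Base.abiInv_of ?_ ?_
    · rw [w_flags]
      simp only [X86.User.df_setStatus]
      exact he_df
    · rw [w_mxcsr]
      exact he_mx
  · -- the constructor's precondition: the descriptor table is still in memory (the two pushes went to the stack, above it)
    refine ⟨?_, hok⟩
    have heq : Mem.EqOn 0x100000 0x700000 u.mem s_100e68.mem := by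
      rw [w_mem]
      u_eqon
    exact Gif.Spec.run_ctors.rc_descsIn_eqOn heq Gif.Spec.run_ctors.rc_table_bounds.1 Gif.Spec.run_ctors.rc_table_bounds.2 (by decide) hdescs
  -- 0x100e6a asan_rt.c:193 `p++`, after the return of the constructor: the code span, the two stack slots the rest of the walk
  -- reads (saved rbx, the return address) through the constructor's footprint, DF and the MXCSR masks
  have w_eq := ProgX.Base.conv_code_eqOn w_code
  simp only [X86.User.Spec.footprint, vspec, w_rsp_100e68, Gif.Spec.run_ctors.rc_ctor_writes] at w_same
  have hs1' : UInt64.ofNat (s_100e68.mem.readLE (u.reg .rsp - 8) 8) = u.reg .rbx := by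
    rw [w_mem_100e68]
    u_read
  have hs0' : UInt64.ofNat (s_100e68.mem.readLE (u.reg .rsp) 8) = ret := by
    rw [w_mem_100e68]
    u_frame he_retAddr
  have hs1 : UInt64.ofNat (s_100e68r.mem.readLE (u.reg .rsp - 8) 8) = u.reg .rbx := by
    u_frame hs1'
  have hs0 : UInt64.ofNat (s_100e68r.mem.readLE (u.reg .rsp) 8) = ret := by
    u_frame hs0'
  have hdf : s_100e68r.flags .df = false := (show abiInv _ from w_inv).1
  have hmx : s_100e68r.mxcsr &&& 0x1F80 = 0x1F80 := (show abiInv _ from w_inv).2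
  -- 0x100e6e asan_rt.c:193 `p < __init_array_end`: false now (rbx = 141008H); 0x100e77 `pop rbx ; ret`
  u_walk hcode [hμ.vendor] span [ProgX.Base.L.textLo, ProgX.Base.L.textHi] side (v_side)
  -- the state after the `ret`: the contract's `Returned`
  refine ReachVia.done ?_
  refine X86.User.Returned.mk w_rip w_rsp ?_ ?_ (ProgX.Base.conv_code_in w_eq) ?_ ?_
  · -- saved: rbx was popped back
    u_saved
  · -- same: our two pushes and the constructor's frame lie in our 32 bytes of stack; its windows are ours
    simp only [X86.User.Spec.footprint, vspec, Gif.Spec.run_ctors.rc_runCtors_writes]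
    u_same
  · -- inv: DF and the MXCSR masks are the returned constructor's (`add`, `cmp` wrote status flags only)
    show X86.User.abiInv _
    refine ProgX.Base.abiInv_of ?_ ?_
    · rw [w_flags]
      simp only [X86.User.df_setStatus]
      exact hdf
    · rw [w_mxcsr]
      exact hmx
  · -- the post (P1, SH5): the shadow is that of `registerMem u.mem descs`. The constructor's post says so of the memory at ITS
    -- entry, whose shadow is ours (two stack stores), and `registerMem` reads and writes the shadow only
    show Mem.EqOn 0xC00000 0xE00000 (registerMem u.mem Gif.Spec.rt.descs) s_100e78.mem
    have hun : Mem.EqOn 0xC00000 0xE00000 u.mem s_100e68.mem := by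
      rw [w_mem_100e68]
      u_eqon
    rw [w_mem]
    exact (Gif.Spec.run_ctors.rc_eqOn_registerMem hun Gif.Spec.rt.descs).trans w_post
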